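-- pv_equiv track=rewrite | github.com/denis-spe/py_advent_2015 | src/advent2015/day1/day.py | santa_position
-- ===== SOURCE A (Python) =====
-- from typing import List
--
-- def santa_position(instructions: List[int]):
--     pos = 0
--     instruction_pos = 0
--
--     for instruction in instructions:
--         instruction_pos = instruction_pos + instruction
--         pos = pos + 1
--
--         if instruction_pos < 0:
--             break
--
--     return pos
-- ===== SOURCE B (Python) =====
-- def santa_position(instructions):
--     # Phase 1: materialize the table of prefix sums.
--     prefixes = []
--     total = 0
--     for x in instructions:
--         total += x
--         prefixes.append(total)
--     # Phase 2: find the first negative prefix sum.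
--     for i, p in enumerate(prefixes):
--         if p < 0:
--             return i + 1
--     return len(instructions)
-- ===== Notes on version B (the rewrite author's own statement) =====
-- stated objective: idiomatic
-- what changed: Replaced the interleaved accumulate-and-break loop by two phases: build the full prefix-sum table, then scan it for the first negative entry (returning its index+1, or the list length if none).
import Mathlib
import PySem

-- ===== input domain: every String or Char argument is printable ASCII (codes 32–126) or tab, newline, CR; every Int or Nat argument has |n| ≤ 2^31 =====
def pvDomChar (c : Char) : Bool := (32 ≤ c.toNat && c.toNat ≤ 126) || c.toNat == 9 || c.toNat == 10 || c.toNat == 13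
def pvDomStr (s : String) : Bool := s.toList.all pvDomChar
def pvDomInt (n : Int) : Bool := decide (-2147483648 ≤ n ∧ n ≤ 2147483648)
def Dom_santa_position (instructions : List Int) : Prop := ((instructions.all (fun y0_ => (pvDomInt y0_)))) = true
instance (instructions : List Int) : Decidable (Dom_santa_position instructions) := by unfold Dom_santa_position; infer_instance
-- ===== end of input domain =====

-- B restructures A's single accumulate-and-break loop into two phases (build the prefix-sum table, then scan it for the first negative entry); same O(n) cost, no speed claim.


-- ===== PORT A =====
def pvLoopA (pos ipos : Int) : List Int → Int
  | [] => pos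
  | x :: xs =>
    let ipos' := ipos + x
    let pos' := pos + 1
    if ipos' < 0 then pos' else pvLoopA pos' ipos' xs

def santa_position (instructions : List Int) : Int := pvLoopA 0 0 instructions

-- ===== PORT B =====
-- Phase 1: the prefix-sum table (running total starting from t).
def pvPrefixes (t : Int) : List Int → List Int
  | [] => []
  | x :: xs => (t + x) :: pvPrefixes (t + x) xs

-- Phase 2: first index (as i+1) whose entry is negative, else the fallback len.
def pvScan (i len : Int) : List Int → Int
  | [] => len
  | p :: ps => if p < 0 then i + 1 else pvScan (i + 1) len ps

def santa_position_alt (instructions : List Int) : Int :=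
  pvScan 0 (instructions.length : Int) (pvPrefixes 0 instructions)

-- ===== PRECONDITION & SPEC =====
def Spec_santa_position (instructions : List Int) (out : Int) : Prop := out = santa_position_alt instructions
instance (instructions : List Int) (out : Int) : Decidable (Spec_santa_position instructions out) := by unfold Spec_santa_position; infer_instance

-- ===== CLAIM (what is proved, stated in full; the proofs are below) =====
def Claim_equal_santa_position : Prop := ∀ (instructions : List Int), Dom_santa_position instructions → Spec_santa_position instructions (santa_position instructions)

-- ===== LEMMAS AND PROOFS =====

-- ===== VERDICT (by name: the statement is the Claim_ definition above) =====
theorem pvLoopA_eq_scan (xs : List Int) : ∀ (pos ipos : Int),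
    pvLoopA pos ipos xs = pvScan pos (pos + (xs.length : Int)) (pvPrefixes ipos xs) := by
  induction xs with
  | nil => intro pos ipos; simp [pvLoopA, pvPrefixes, pvScan]
  | cons x xs ih =>
    intro pos ipos
    simp only [pvLoopA, pvPrefixes, pvScan, List.length_cons]
    split_ifs with h
    · rfl
    · rw [ih]
      congr 1
      push_cast
      ring

-- ===== VERDICT (by name: the statement is the Claim_ definition above) =====
theorem santa_position_spec : Claim_equal_santa_position := by
  intro xs _
  unfold Spec_santa_position santa_position santa_position_alt
  simpa using pvLoopA_eq_scan xs 0 0
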